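-- pv_equiv track=rewrite | github.com/helloyifan/AlgoPrep | PInterviewSet/maximum-profit-in-job-scheduling/maximum-profit-in-job-scheduling-attempt2.py | binsearchLeft
-- ===== SOURCE A (Python) =====
-- def binsearchLeft(target, ds):
--     l, r = 0, len(ds)-1
--
--     # For this question, we want to find
--     # The biggest (right most index) that is <= to the target
--     biggestIndexSmallerThenTarget = -1
--     while l <= r:
--         med = (l+r)//2
--         val = ds[med][1] # end times
--
--         if target == val:
--             biggestIndexSmallerThenTarget = med
--             l = med + 1
--         elif val < target :
--             biggestIndexSmallerThenTarget = med
--             l = med + 1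
--         elif val > target:
--             r = med -1
--         else:
--             raise("something went wrong")
--
--     return biggestIndexSmallerThenTarget # The first value thats bigger than target
-- ===== SOURCE B (Python) =====
-- def binsearchLeft(target, ds):
--     ans = -1
--     off = 0
--     seg = list(ds)  # shrinking window of candidates
--     while seg:
--         m = (len(seg) - 1) // 2
--         if seg[m][1] <= target:
--             ans = off + m
--             off += m + 1
--             seg = seg[m + 1:]
--         else:
--             seg = seg[:m]
--     return ans
-- ===== Notes on version B (the rewrite author's own statement) =====
-- stated objective: alternative
-- what changed: Instead of moving l/r index bounds over the fixed list, B maintains a shrinking window of the list itself (slicing off the half that is discarded) together with an offset, and fuses A's separate '==' and '<' branches into one '<=' comparison.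
import Mathlib
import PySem

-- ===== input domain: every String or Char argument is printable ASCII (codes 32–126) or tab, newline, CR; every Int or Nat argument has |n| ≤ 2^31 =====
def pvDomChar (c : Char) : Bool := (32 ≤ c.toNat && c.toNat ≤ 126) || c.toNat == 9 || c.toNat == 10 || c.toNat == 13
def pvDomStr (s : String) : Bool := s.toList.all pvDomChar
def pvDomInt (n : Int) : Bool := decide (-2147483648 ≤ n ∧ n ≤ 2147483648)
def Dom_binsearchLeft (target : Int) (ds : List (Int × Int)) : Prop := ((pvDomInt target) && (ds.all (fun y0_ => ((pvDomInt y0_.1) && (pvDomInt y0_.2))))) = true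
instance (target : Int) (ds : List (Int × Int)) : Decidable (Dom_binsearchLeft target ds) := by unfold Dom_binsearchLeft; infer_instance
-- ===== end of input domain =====

-- B replaces A's l/r index bounds over the fixed list by a shrinking window of the list
-- itself (slicing off the discarded half) with an offset accumulator (objective: alternative).

-- ===== PORT A =====
-- A's while loop, transliterated as tail recursion over the same state (l, r, best).
-- The 'else: raise' branch of A is unreachable (Int trichotomy); the pyGet? none case
-- is likewise unreachable since 0 ≤ l ≤ med ≤ r < len ds throughout; both return best here.
def binsearchLeftLoop (target : Int) (ds : List (Int × Int)) (l r best : Int) : Int :=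
  if _h : l ≤ r then
    let med := PySem.Int.floordiv (l + r) 2
    match PySem.List.pyGet? ds med with
    | none => best  -- IndexError: unreachable from binsearchLeft's initial state
    | some d =>
      let val := d.2
      if target = val then
        binsearchLeftLoop target ds (med + 1) r med
      else if val < target then
        binsearchLeftLoop target ds (med + 1) r med
      else if val > target then
        binsearchLeftLoop target ds l (med - 1) best
      else
        best  -- 'raise': unreachable by trichotomy
  else
    best
termination_by (r - l + 1).toNat
decreasing_by
  · have := PySem.Int.floordiv_two_mid_bounds _h; omega
  · have := PySem.Int.floordiv_two_mid_bounds _h; omega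

def binsearchLeft (target : Int) (ds : List (Int × Int)) : Int :=
  binsearchLeftLoop target ds 0 (PySem.List.len ds - 1) (-1)

-- ===== PORT B =====
-- Source B's while loop over the shrinking window 'seg' with offset 'off' and answer 'ans'.
-- 'seg[m]' is a plain nonnegative in-range index (m = (len seg - 1)/2 < len seg), ported as seg[m]?.
def binsearchLeftWin (target : Int) (seg : List (Int × Int)) (off : Nat) (ans : Int) : Int :=
  if _hne : seg.length = 0 then ans
  else
    let m := (seg.length - 1) / 2
    match seg[m]? with
    | none => ans  -- unreachable: m < seg.length
    | some d =>
      if d.2 ≤ target then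
        binsearchLeftWin target (seg.drop (m + 1)) (off + m + 1) ((off + m : Nat) : Int)
      else
        binsearchLeftWin target (seg.take m) off ans
termination_by seg.length
decreasing_by
  · simp [List.length_drop]; omega
  · simp [List.length_take]; omega

def binsearchLeft_alt (target : Int) (ds : List (Int × Int)) : Int :=
  binsearchLeftWin target ds 0 (-1)

-- ===== PRECONDITION & SPEC =====
def Spec_binsearchLeft (target : Int) (ds : List (Int × Int)) (out : Int) : Prop := out = binsearchLeft_alt target ds
instance (target : Int) (ds : List (Int × Int)) (out : Int) : Decidable (Spec_binsearchLeft target ds out) := by unfold Spec_binsearchLeft; infer_instance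

-- ===== CLAIM (what is proved, stated in full; the proofs are below) =====
def Claim_equal_binsearchLeft : Prop := ∀ (target : Int) (ds : List (Int × Int)), Dom_binsearchLeft target ds → Spec_binsearchLeft target ds (binsearchLeft target ds)

-- ===== LEMMAS AND PROOFS =====
-- Invariant: A's state (l, r, best) with 0 ≤ l and r < len ds corresponds to B's window
-- seg = (ds.drop l.toNat).take (r - l + 1).toNat with off = l.toNat and ans = best.
theorem loop_eq_win_aux (target : Int) (ds : List (Int × Int)) :
    ∀ (n : Nat) (l r best : Int), 0 ≤ l → r < (ds.length : Int) → (r - l + 1).toNat ≤ n →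
      binsearchLeftLoop target ds l r best
        = binsearchLeftWin target ((ds.drop l.toNat).take (r - l + 1).toNat) l.toNat best := by
  intro n
  induction n with
  | zero =>
      intro l r best hl hr hm
      have hlr : ¬ l ≤ r := by omega
      rw [binsearchLeftLoop.eq_def, binsearchLeftWin.eq_def]
      have : (r - l + 1).toNat = 0 := by omega
      simp [hlr, this]
  | succ n ih =>
      intro l r best hl hr hm
      rw [binsearchLeftLoop.eq_def, binsearchLeftWin.eq_def]
      by_cases hlr : l ≤ r
      · have hb := PySem.Int.floordiv_two_mid_bounds hlr
        set med := PySem.Int.floordiv (l + r) 2 with hmed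
        have hlen : ((ds.drop l.toNat).take (r - l + 1).toNat).length = (r - l + 1).toNat := by
          simp [List.length_take, List.length_drop]; omega
        have hseg0 : ((ds.drop l.toNat).take (r - l + 1).toNat).length ≠ 0 := by omega
        -- med = l + (k-1)/2 where k is the window length
        have hmedeq : med = (l.toNat + ((r - l + 1).toNat - 1) / 2 : Nat) := by
          have h2 : (0:Int) < 2 := by omega
          rw [hmed, PySem.Int.floordiv_eq_ediv_of_pos h2]
          omega
        clear_value med
        have hmedrange : med.toNat < ds.length := by omega
        -- the window's middle element is ds[med]
        have hgetseg : ((ds.drop l.toNat).take (r - l + 1).toNat)[(((ds.drop l.toNat).take (r - l + 1).toNat).length - 1) / 2]?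
            = ds[med.toNat]? := by
          rw [hlen]
          rw [List.getElem?_take_of_lt (by omega), List.getElem?_drop]
          congr 1
          omega
        have hgetA : PySem.List.pyGet? ds med = some ds[med.toNat] := by
          rw [PySem.List.pyGet?_of_nonneg ds (by omega)]
          exact List.getElem?_eq_getElem hmedrange
        simp only [dif_pos hlr, dif_neg hseg0, hgetA, hgetseg,
          List.getElem?_eq_getElem hmedrange]
        set d := ds[med.toNat] with hd
        -- the correspondence equalities for the two recursive calls
        have eSegR : ((ds.drop l.toNat).take (r - l + 1).toNat).drop
              ((((ds.drop l.toNat).take (r - l + 1).toNat).length - 1) / 2 + 1)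
            = (ds.drop (med + 1).toNat).take (r - (med + 1) + 1).toNat := by
          rw [hlen, List.drop_take, List.drop_drop]
          congr 1
          · omega
          · congr 1
            omega
        have eOffR : l.toNat + (((ds.drop l.toNat).take (r - l + 1).toNat).length - 1) / 2 + 1
            = (med + 1).toNat := by rw [hlen]; omega
        have eAnsR : ((l.toNat + (((ds.drop l.toNat).take (r - l + 1).toNat).length - 1) / 2 : Nat) : Int)
            = med := by rw [hlen]; omega
        have eSegL : ((ds.drop l.toNat).take (r - l + 1).toNat).take
              ((((ds.drop l.toNat).take (r - l + 1).toNat).length - 1) / 2)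
            = (ds.drop l.toNat).take ((med - 1) - l + 1).toNat := by
          rw [hlen, List.take_take]
          congr 1
          omega
        rcases lt_trichotomy d.2 target with hlt | heq | hgt
        · rw [if_neg (ne_of_gt hlt), if_pos hlt, if_pos hlt.le,
            ih (med + 1) r med (by omega) hr (by omega), eSegR, eOffR, eAnsR]
        · rw [if_pos heq.symm, if_pos (le_of_eq heq),
            ih (med + 1) r med (by omega) hr (by omega), eSegR, eOffR, eAnsR]
        · rw [if_neg (ne_of_lt hgt), if_neg (not_lt.mpr hgt.le), if_pos hgt,
            if_neg (not_le.mpr hgt),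
            ih l (med - 1) best hl (by omega) (by omega), eSegL]
      · have : (r - l + 1).toNat = 0 := by omega
        simp [hlr, this]

-- the initial states correspond: l = 0, r = len ds - 1, window = the whole list
theorem binsearchLeft_eq_alt (target : Int) (ds : List (Int × Int)) :
    binsearchLeft target ds = binsearchLeft_alt target ds := by
  unfold binsearchLeft binsearchLeft_alt
  have h := loop_eq_win_aux target ds ((PySem.List.len ds - 1) - 0 + 1).toNat
    0 (PySem.List.len ds - 1) (-1) (by omega) (by rw [PySem.List.len_eq]; omega) le_rfl
  rw [h]
  congr 1
  rw [show Int.toNat 0 = 0 from rfl, List.drop_zero]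
  exact List.take_of_length_le (by rw [PySem.List.len_eq]; omega)

-- ===== VERDICT (by name: the statement is the Claim_ definition above) =====
theorem binsearchLeft_spec : Claim_equal_binsearchLeft := by
  intro target ds _
  unfold Spec_binsearchLeft
  exact binsearchLeft_eq_alt target ds
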